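-- pv_equiv track=rewrite | github.com/digitalgoldfisj79/Voynich | VPCA-SM/analysis/semantic_triangulation.py | extract_morphemes
-- ===== SOURCE A (Python) =====
-- PREFIXES = ['ch', 'ot', 'ok', 'sh', 'qo', 'da', 'yk', 'ol', 'sa', 'op', 'do']
--
-- SUFFIXES = ['ey', 'dy', 'in', 'ar', 'al', 'ol', 'os', 'or', 'es', 'oy', 'y', 'e', 'ed', 'om']
--
-- def extract_morphemes(token):
--     """Extract PREFIX + ROOT + SUFFIX."""
--     for prefix in sorted(PREFIXES, key=len, reverse=True):
--         if token.startswith(prefix):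
--             remainder = token[len(prefix):]
--
--             for suffix in sorted(SUFFIXES, key=len, reverse=True):
--                 if remainder.endswith(suffix):
--                     root = remainder[:-len(suffix)] if suffix else remainder
--                     if root:
--                         return (prefix, root, suffix)
--
--             if remainder:
--                 return (prefix, remainder, '')
--
--     for suffix in sorted(SUFFIXES, key=len, reverse=True):
--         if token.endswith(suffix):
--             root = token[:-len(suffix)] if suffix else token
--             if root and len(root) > 1:
--                 return ('', root, suffix)
--
--     return ('', token, '')
-- ===== SOURCE B (Python) =====
-- PREFIXES = ['ch', 'ot', 'ok', 'sh', 'qo', 'da', 'yk', 'ol', 'sa', 'op', 'do']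
--
-- SUFFIXES = ['ey', 'dy', 'in', 'ar', 'al', 'ol', 'os', 'or', 'es', 'oy', 'y', 'e', 'ed', 'om']
--
--
-- def _best_suffix(s, min_root):
--     """Longest suffix in SUFFIXES whose removal leaves a root of >= min_root chars (empty string if none)."""
--     return max((x for x in SUFFIXES if s.endswith(x) and len(s) - len(x) >= min_root),
--                key=len, default='')
--
--
-- def extract_morphemes(token):
--     """Extract PREFIX + ROOT + SUFFIX."""
--     prefix = next((p for p in PREFIXES if token.startswith(p) and len(token) > len(p)), None)
--     if prefix is not None:
--         remainder = token[len(prefix):]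
--         suffix = _best_suffix(remainder, 1)
--         if suffix:
--             return (prefix, remainder[:-len(suffix)], suffix)
--         return (prefix, remainder, '')
--     suffix = _best_suffix(token, 2)
--     if suffix:
--         return ('', token[:-len(suffix)], suffix)
--     return ('', token, '')
-- ===== Notes on version B (the rewrite author's own statement) =====
-- stated objective: alternative
-- what changed: Replaces A's sorted-by-length nested loops with early return and fall-through by direct selection: the (unique) qualifying prefix is picked with next() over PREFIXES, and the suffix as the longest qualifying candidate via max with key=len (defaulting to the empty string) over SUFFIXES, with the root-length guard folded into the candidate filter.
import Mathlib
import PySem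

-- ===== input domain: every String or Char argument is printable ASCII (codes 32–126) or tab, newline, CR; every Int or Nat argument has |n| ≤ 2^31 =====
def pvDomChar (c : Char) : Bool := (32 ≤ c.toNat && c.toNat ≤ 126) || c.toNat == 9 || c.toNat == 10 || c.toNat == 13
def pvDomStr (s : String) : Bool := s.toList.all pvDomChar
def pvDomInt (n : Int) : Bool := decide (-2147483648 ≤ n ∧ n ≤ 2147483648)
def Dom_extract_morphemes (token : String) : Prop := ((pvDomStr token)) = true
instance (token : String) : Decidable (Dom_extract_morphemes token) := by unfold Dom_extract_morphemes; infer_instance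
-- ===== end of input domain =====

-- B selects the longest matching affix directly (find?/max) instead of A's sorted loops with
-- early return; same return value everywhere (proved total equivalence).

-- ===== PORT A =====
-- the module constants PREFIXES and SUFFIXES, as code-point lists
def pvPrefs : List (List Char) :=
  [['c','h'], ['o','t'], ['o','k'], ['s','h'], ['q','o'], ['d','a'], ['y','k'],
   ['o','l'], ['s','a'], ['o','p'], ['d','o']]

def pvSufs : List (List Char) :=
  [['e','y'], ['d','y'], ['i','n'], ['a','r'], ['a','l'], ['o','l'], ['o','s'],
   ['o','r'], ['e','s'], ['o','y'], ['y'], ['e'], ['e','d'], ['o','m']]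

-- inner 'for suffix in sorted(SUFFIXES, key=len, reverse=True)' loop (root must be non-empty)
def pvSufLoopA (rem : List Char) : List (List Char) → Option (List Char × List Char)
  | [] => none
  | s :: rest =>
    if PySem.Chars.endswith rem s then
      let root := if s ≠ [] then PySem.Chars.slice rem none (some (-(s.length : Int))) else rem
      if root ≠ [] then some (root, s) else pvSufLoopA rem rest
    else pvSufLoopA rem rest

-- outer suffix loop ('if root and len(root) > 1')
def pvSufLoopA2 (t : List Char) : List (List Char) → Option (List Char × List Char)
  | [] => none
  | s :: rest =>
    if PySem.Chars.endswith t s then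
      let root := if s ≠ [] then PySem.Chars.slice t none (some (-(s.length : Int))) else t
      if root ≠ [] ∧ 1 < root.length then some (root, s) else pvSufLoopA2 t rest
    else pvSufLoopA2 t rest

-- 'for prefix in sorted(PREFIXES, key=len, reverse=True)' loop
def pvPrefLoopA (t : List Char) : List (List Char) → Option (List Char × List Char × List Char)
  | [] => none
  | p :: rest =>
    if PySem.Chars.startswith t p then
      let rem := PySem.Chars.slice t (some (p.length : Int)) none
      match pvSufLoopA rem (PySem.List.sorted pvSufs (·.length) true) with
      | some (root, s) => some (p, root, s)
      | none => if rem ≠ [] then some (p, rem, []) else pvPrefLoopA t rest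
    else pvPrefLoopA t rest

def extract_morphemes (token : String) : String × String × String :=
  let t := token.toList
  match pvPrefLoopA t (PySem.List.sorted pvPrefs (·.length) true) with
  | some (p, root, s) => (String.ofList p, String.ofList root, String.ofList s)
  | none =>
    match pvSufLoopA2 t (PySem.List.sorted pvSufs (·.length) true) with
    | some (root, s) => ("", String.ofList root, String.ofList s)
    | none => ("", token, "")

-- ===== PORT B =====
-- candidate condition: s.endswith(x) and len(s) - len(x) >= min_root
def pvCond (r : List Char) (m : Int) (x : List Char) : Bool :=
  PySem.Chars.endswith r x && decide ((r.length : Int) - (x.length : Int) ≥ m)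

-- max((x for x in SUFFIXES if …), key=len, default='')
def pvBestSuffix (r : List Char) (m : Int) : List Char :=
  PySem.List.maxD (pvSufs.filter (pvCond r m)) (·.length) []

def extract_morphemes_alt (token : String) : String × String × String :=
  let t := token.toList
  match pvPrefs.find? (fun p => PySem.Chars.startswith t p && decide (t.length > p.length)) with
  | some p =>
    let rem := PySem.Chars.slice t (some (p.length : Int)) none
    let s := pvBestSuffix rem 1
    if s ≠ [] then
      (String.ofList p, String.ofList (PySem.Chars.slice rem none (some (-(s.length : Int)))), String.ofList s)
    else (String.ofList p, String.ofList rem, "")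
  | none =>
    let s := pvBestSuffix t 2
    if s ≠ [] then
      ("", String.ofList (PySem.Chars.slice t none (some (-(s.length : Int)))), String.ofList s)
    else ("", token, "")

-- ===== PRECONDITION & SPEC =====
def Spec_extract_morphemes (token : String) (out : String × String × String) : Prop := out = extract_morphemes_alt token
instance (token : String) (out : String × String × String) : Decidable (Spec_extract_morphemes token out) := by unfold Spec_extract_morphemes; infer_instance

-- ===== CLAIM (what is proved, stated in full; the proofs are below) =====
def Claim_equal_extract_morphemes : Prop := ∀ (token : String), Dom_extract_morphemes token → Spec_extract_morphemes token (extract_morphemes token)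

-- ===== LEMMAS AND PROOFS =====

-- the sorted constant lists evaluate to literals
def pvSufsSorted : List (List Char) :=
  [['e','y'], ['d','y'], ['i','n'], ['a','r'], ['a','l'], ['o','l'], ['o','s'],
   ['o','r'], ['e','s'], ['o','y'], ['e','d'], ['o','m'], ['y'], ['e']]

theorem sorted_prefs : PySem.List.sorted pvPrefs (·.length) true = pvPrefs := by decide

theorem sorted_sufs : PySem.List.sorted pvSufs (·.length) true = pvSufsSorted := by decide

-- two suffixes (prefixes) of the same list with the same length coincide
theorem suffix_unique {r s₁ s₂ : List Char} (h₁ : PySem.Chars.endswith r s₁ = true)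
    (h₂ : PySem.Chars.endswith r s₂ = true) (hl : s₁.length = s₂.length) : s₁ = s₂ := by
  rw [PySem.Chars.endswith_iff] at h₁ h₂
  rcases List.suffix_or_suffix_of_suffix h₁ h₂ with h | h
  · exact List.IsSuffix.eq_of_length h hl
  · exact (List.IsSuffix.eq_of_length h hl.symm).symm

theorem prefix_eq_of_length {t p : List Char} (h : PySem.Chars.startswith t p = true)
    (hl : t.length ≤ p.length) : t = p := by
  rw [PySem.Chars.startswith_iff] at h
  exact (List.IsPrefix.eq_of_length h (le_antisymm h.length_le hl)).symm

-- max(xs, key) returns s when s is in xs, maximal, and the unique element of maximal key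
theorem pv_max_aux {α : Type} (key : α → Nat) (s : α) :
    ∀ (xs : List α) (acc : Option α),
      (∀ x ∈ xs, key x ≤ key s) → (∀ x ∈ xs, key x = key s → x = s) →
      (acc = some s ∨ ((∀ m, acc = some m → key m < key s) ∧ s ∈ xs)) →
      List.foldl (fun acc x => match acc with
        | none => some x
        | some m => if key m < key x then some x else some m) acc xs = some s := by
  intro xs
  induction xs with
  | nil =>
    intro acc _ _ hacc
    rcases hacc with rfl | ⟨_, hmem⟩
    · rfl
    · cases hmem
  | cons x xs ih =>
    intro acc hle huniq hacc
    simp only [List.foldl_cons]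
    have hle' : ∀ y ∈ xs, key y ≤ key s := fun y hy => hle y (List.mem_cons_of_mem _ hy)
    have huniq' : ∀ y ∈ xs, key y = key s → y = s := fun y hy => huniq y (List.mem_cons_of_mem _ hy)
    rcases hacc with rfl | ⟨hlt, hmem⟩
    · have hx : ¬ key s < key x := not_lt.mpr (hle x (List.mem_cons_self))
      show List.foldl _ (if key s < key x then some x else some s) xs = some s
      rw [if_neg hx]
      exact ih (some s) hle' huniq' (Or.inl rfl)
    · by_cases hxs : x = s
      · subst hxs
        rcases acc with _ | m
        · exact ih (some x) hle' huniq' (Or.inl rfl)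
        · show List.foldl _ (if key m < key x then some x else some m) xs = some x
          rw [if_pos (hlt m rfl)]
          exact ih (some x) hle' huniq' (Or.inl rfl)
      · have hsmem : s ∈ xs := by
          rcases List.mem_cons.mp hmem with h | h
          · exact absurd h.symm hxs
          · exact h
        have hkx : key x < key s :=
          lt_of_le_of_ne (hle x (List.mem_cons_self)) (fun h => hxs (huniq x (List.mem_cons_self) h))
        rcases acc with _ | m
        · exact ih (some x) hle' huniq' (Or.inr ⟨by rintro m ⟨rfl⟩; exact hkx, hsmem⟩)
        · show List.foldl _ (if key m < key x then some x else some m) xs = some s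
          by_cases hmx : key m < key x
          · rw [if_pos hmx]
            exact ih (some x) hle' huniq' (Or.inr ⟨by rintro m' ⟨rfl⟩; exact hkx, hsmem⟩)
          · rw [if_neg hmx]
            exact ih (some m) hle' huniq' (Or.inr ⟨by rintro m' ⟨rfl⟩; exact hlt m rfl, hsmem⟩)

theorem max?_eq_some_of {α : Type} (key : α → Nat) (xs : List α) (s : α) (hmem : s ∈ xs)
    (hle : ∀ x ∈ xs, key x ≤ key s) (huniq : ∀ x ∈ xs, key x = key s → x = s) :
    PySem.List.max? xs key = some s := by
  unfold PySem.List.max?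
  exact pv_max_aux key s xs none hle huniq (Or.inr ⟨by rintro m ⟨⟩, hmem⟩)

theorem cond_ends {r : List Char} {m : Int} {x : List Char} (h : pvCond r m x = true) :
    PySem.Chars.endswith r x = true := by simp [pvCond] at h; exact h.1


theorem bestSuffix_spec2 (r : List Char) (m : Int) (s : List Char) (hmem : s ∈ pvSufs)
    (hl : s.length = 2) (hP : pvCond r m s = true) : pvBestSuffix r m = s := by
  unfold pvBestSuffix PySem.List.maxD
  rw [max?_eq_some_of (·.length) _ s (List.mem_filter.mpr ⟨hmem, hP⟩) ?_ ?_]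
  · rfl
  · intro x hx
    have hx1 := (List.mem_filter.mp hx).1
    have h2 : x.length ≤ 2 := by fin_cases hx1 <;> simp
    show x.length ≤ s.length
    omega
  · intro x hx hlen
    have hlen' : x.length = s.length := hlen
    exact suffix_unique (cond_ends (List.mem_filter.mp hx).2) (cond_ends hP) hlen'

theorem bestSuffix_spec1 (r : List Char) (m : Int) (s : List Char) (hmem : s ∈ pvSufs)
    (hl : s.length = 1) (hP : pvCond r m s = true)
    (hno2 : ∀ x ∈ pvSufs, x.length = 2 → pvCond r m x = false) : pvBestSuffix r m = s := by
  unfold pvBestSuffix PySem.List.maxD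
  rw [max?_eq_some_of (·.length) _ s (List.mem_filter.mpr ⟨hmem, hP⟩) ?_ ?_]
  · rfl
  · intro x hx
    have hx1 := (List.mem_filter.mp hx).1
    have hx2 := (List.mem_filter.mp hx).2
    have h12 : x.length = 1 ∨ x.length = 2 := by fin_cases hx1 <;> simp
    rcases h12 with h | h
    · show x.length ≤ s.length
      omega
    · rw [hno2 x hx1 h] at hx2; cases hx2
  · intro x hx hlen
    have hlen' : x.length = s.length := hlen
    exact suffix_unique (cond_ends (List.mem_filter.mp hx).2) (cond_ends hP) hlen'

theorem bestSuffix_nil (r : List Char) (m : Int)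
    (h : ∀ x ∈ pvSufs, pvCond r m x = false) : pvBestSuffix r m = [] := by
  unfold pvBestSuffix
  rw [List.filter_eq_nil_iff.mpr (by intro x hx; simp [h x hx])]
  rfl

-- A's inner suffix loop is first-match search for pvCond r 1
theorem loop1_eq_find (r : List Char) (l : List (List Char)) (hne : ∀ s ∈ l, s ≠ []) :
    pvSufLoopA r l = (l.find? (pvCond r 1)).map
      (fun s => (PySem.Chars.slice r none (some (-(s.length : Int))), s)) := by
  induction l with
  | nil => rfl
  | cons s rest ih =>
    have hs : s ≠ [] := hne s List.mem_cons_self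
    have hne' : ∀ x ∈ rest, x ≠ [] := fun x hx => hne x (List.mem_cons_of_mem _ hx)
    have h0 : 0 < s.length := List.length_pos_of_ne_nil hs
    simp only [pvSufLoopA, List.find?_cons, if_pos hs]
    by_cases he : PySem.Chars.endswith r s
    · rw [if_pos he]
      have hlen : s.length ≤ r.length := ((PySem.Chars.endswith_iff r s).mp he).length_le
      have hslice : PySem.Chars.slice r none (some (-(s.length : Int))) = r.take (r.length - s.length) := by
        simp [PySem.List.slice_to_neg_natCast _ _ h0]
      by_cases hroot : s.length < r.length
      · have hcond : pvCond r 1 s = true := by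
          simp [pvCond, he]; omega
        have hr : PySem.Chars.slice r none (some (-(s.length : Int))) ≠ [] := by
          rw [hslice]
          have hp : 0 < (List.take (r.length - s.length) r).length := by
            simp
            omega
          exact List.ne_nil_of_length_pos hp
        rw [hcond, if_pos hr]
        simp
      · have hcond : pvCond r 1 s = false := by
          simp [pvCond, he]; omega
        have h00 : r.length - s.length = 0 := by omega
        have hr : PySem.Chars.slice r none (some (-(s.length : Int))) = [] := by
          rw [hslice, h00, List.take_zero]
        rw [hcond, if_neg (not_not_intro hr)]
        simpa using ih hne'
    · rw [if_neg he]
      have hcond : pvCond r 1 s = false := by simp [pvCond, he]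
      rw [hcond]
      exact ih hne'

theorem loop2_eq_find (t : List Char) (l : List (List Char)) (hne : ∀ s ∈ l, s ≠ []) :
    pvSufLoopA2 t l = (l.find? (pvCond t 2)).map
      (fun s => (PySem.Chars.slice t none (some (-(s.length : Int))), s)) := by
  induction l with
  | nil => rfl
  | cons s rest ih =>
    have hs : s ≠ [] := hne s List.mem_cons_self
    have hne' : ∀ x ∈ rest, x ≠ [] := fun x hx => hne x (List.mem_cons_of_mem _ hx)
    have h0 : 0 < s.length := List.length_pos_of_ne_nil hs
    simp only [pvSufLoopA2, List.find?_cons, if_pos hs]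
    by_cases he : PySem.Chars.endswith t s
    · rw [if_pos he]
      have hlen : s.length ≤ t.length := ((PySem.Chars.endswith_iff t s).mp he).length_le
      have hslice : PySem.Chars.slice t none (some (-(s.length : Int))) = t.take (t.length - s.length) := by
        simp [PySem.List.slice_to_neg_natCast _ _ h0]
      have hrootlen : (PySem.Chars.slice t none (some (-(s.length : Int)))).length
          = t.length - s.length := by
        rw [hslice]
        simp
      by_cases hroot : s.length + 2 ≤ t.length
      · have hcond : pvCond t 2 s = true := by
          simp [pvCond, he]; omega
        have hr : PySem.Chars.slice t none (some (-(s.length : Int))) ≠ []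
            ∧ 1 < (PySem.Chars.slice t none (some (-(s.length : Int)))).length := by
          constructor
          · exact List.ne_nil_of_length_pos (by omega)
          · omega
        rw [hcond, if_pos hr]
        simp
      · have hcond : pvCond t 2 s = false := by
          simp [pvCond, he]; omega
        have hr : ¬ (PySem.Chars.slice t none (some (-(s.length : Int))) ≠ []
            ∧ 1 < (PySem.Chars.slice t none (some (-(s.length : Int)))).length) := by
          rintro ⟨-, h2⟩
          omega
        rw [hcond, if_neg hr]
        simpa using ih hne'
    · rw [if_neg he]
      have hcond : pvCond t 2 s = false := by simp [pvCond, he]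
      rw [hcond]
      exact ih hne'

-- first match over the length-sorted list = longest match over the original list
theorem find_eq_best (r : List Char) (m : Int) :
    pvSufsSorted.find? (pvCond r m) =
      (if pvBestSuffix r m = [] then none else some (pvBestSuffix r m)) := by
  simp only [pvSufsSorted]
  by_cases h1 : pvCond r m ['e','y'] = true
  · rw [List.find?_cons_of_pos h1, bestSuffix_spec2 r m _ (by decide) (by decide) h1]
    decide
  rw [List.find?_cons_of_neg h1]
  by_cases h2 : pvCond r m ['d','y'] = true
  · rw [List.find?_cons_of_pos h2, bestSuffix_spec2 r m _ (by decide) (by decide) h2]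
    decide
  rw [List.find?_cons_of_neg h2]
  by_cases h3 : pvCond r m ['i','n'] = true
  · rw [List.find?_cons_of_pos h3, bestSuffix_spec2 r m _ (by decide) (by decide) h3]
    decide
  rw [List.find?_cons_of_neg h3]
  by_cases h4 : pvCond r m ['a','r'] = true
  · rw [List.find?_cons_of_pos h4, bestSuffix_spec2 r m _ (by decide) (by decide) h4]
    decide
  rw [List.find?_cons_of_neg h4]
  by_cases h5 : pvCond r m ['a','l'] = true
  · rw [List.find?_cons_of_pos h5, bestSuffix_spec2 r m _ (by decide) (by decide) h5]
    decide
  rw [List.find?_cons_of_neg h5]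
  by_cases h6 : pvCond r m ['o','l'] = true
  · rw [List.find?_cons_of_pos h6, bestSuffix_spec2 r m _ (by decide) (by decide) h6]
    decide
  rw [List.find?_cons_of_neg h6]
  by_cases h7 : pvCond r m ['o','s'] = true
  · rw [List.find?_cons_of_pos h7, bestSuffix_spec2 r m _ (by decide) (by decide) h7]
    decide
  rw [List.find?_cons_of_neg h7]
  by_cases h8 : pvCond r m ['o','r'] = true
  · rw [List.find?_cons_of_pos h8, bestSuffix_spec2 r m _ (by decide) (by decide) h8]
    decide
  rw [List.find?_cons_of_neg h8]
  by_cases h9 : pvCond r m ['e','s'] = true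
  · rw [List.find?_cons_of_pos h9, bestSuffix_spec2 r m _ (by decide) (by decide) h9]
    decide
  rw [List.find?_cons_of_neg h9]
  by_cases h10 : pvCond r m ['o','y'] = true
  · rw [List.find?_cons_of_pos h10, bestSuffix_spec2 r m _ (by decide) (by decide) h10]
    decide
  rw [List.find?_cons_of_neg h10]
  by_cases h11 : pvCond r m ['e','d'] = true
  · rw [List.find?_cons_of_pos h11, bestSuffix_spec2 r m _ (by decide) (by decide) h11]
    decide
  rw [List.find?_cons_of_neg h11]
  by_cases h12 : pvCond r m ['o','m'] = true
  · rw [List.find?_cons_of_pos h12, bestSuffix_spec2 r m _ (by decide) (by decide) h12]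
    decide
  rw [List.find?_cons_of_neg h12]
  by_cases h13 : pvCond r m ['y'] = true
  · have hno2 : ∀ x ∈ pvSufs, x.length = 2 → pvCond r m x = false := by
      intro x hx hlen
      fin_cases hx <;> simp_all
    rw [List.find?_cons_of_pos h13, bestSuffix_spec1 r m _ (by decide) (by decide) h13 hno2]
    decide
  rw [List.find?_cons_of_neg h13]
  by_cases h14 : pvCond r m ['e'] = true
  · have hno2 : ∀ x ∈ pvSufs, x.length = 2 → pvCond r m x = false := by
      intro x hx hlen
      fin_cases hx <;> simp_all
    rw [List.find?_cons_of_pos h14, bestSuffix_spec1 r m _ (by decide) (by decide) h14 hno2]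
    decide
  rw [List.find?_cons_of_neg h14]
  have hall : ∀ x ∈ pvSufs, pvCond r m x = false := by
    intro x hx
    fin_cases hx <;> simp_all
  rw [List.find?_nil, bestSuffix_nil r m hall]
  decide

theorem prefLoop_nomatch (t : List Char) (l : List (List Char))
    (h : ∀ q ∈ l, PySem.Chars.startswith t q = false) : pvPrefLoopA t l = none := by
  induction l with
  | nil => rfl
  | cons p rest ih =>
    simp only [pvPrefLoopA]
    rw [if_neg (by simp [h p List.mem_cons_self])]
    exact ih (fun q hq => h q (List.mem_cons_of_mem _ hq))

theorem prefLoop_eq_find (t : List Char) (l : List (List Char))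
    (h2 : ∀ p ∈ l, p.length = 2) (hnd : l.Nodup) :
    pvPrefLoopA t l =
      (l.find? (fun p => PySem.Chars.startswith t p && decide (t.length > p.length))).map
        (fun p =>
          match pvSufLoopA (PySem.Chars.slice t (some (p.length : Int)) none)
              (PySem.List.sorted pvSufs (·.length) true) with
          | some (root, s) => (p, root, s)
          | none => (p, PySem.Chars.slice t (some (p.length : Int)) none, [])) := by
  induction l with
  | nil => rfl
  | cons p rest ih =>
    have hp2 : p.length = 2 := h2 p List.mem_cons_self
    have h2' : ∀ q ∈ rest, q.length = 2 := fun q hq => h2 q (List.mem_cons_of_mem _ hq)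
    have hpn : p ∉ rest := (List.nodup_cons.mp hnd).1
    have hnd' : rest.Nodup := (List.nodup_cons.mp hnd).2
    simp only [pvPrefLoopA, List.find?_cons]
    by_cases hs : PySem.Chars.startswith t p
    · rw [if_pos hs]
      have hple : p.length ≤ t.length := ((PySem.Chars.startswith_iff t p).mp hs).length_le
      have hsliceL : PySem.List.slice t (some (p.length : Int)) none = t.drop p.length := by
        rw [PySem.List.slice_from_natCast]
      by_cases hlen : p.length < t.length
      · have hcond : (PySem.Chars.startswith t p && decide (t.length > p.length)) = true := by
          simp [hs]; omega
        rw [hcond]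
        have hrem : t.drop p.length ≠ [] :=
          List.ne_nil_of_length_pos (by simp; omega)
        cases hsl : pvSufLoopA (t.drop p.length)
            (PySem.List.sorted pvSufs (·.length) true) with
        | some v =>
          rcases v with ⟨root, s⟩
          simp [hsliceL, hsl]
        | none => simp [hsliceL, hsl, hrem]
      · have ht : t = p := prefix_eq_of_length hs (by omega)
        have hcond : (PySem.Chars.startswith t p && decide (t.length > p.length)) = false := by
          simp [hlen]
        have hrem : PySem.Chars.slice t (some (p.length : Int)) none = [] := by
          simp only [PySem.Chars.slice_eq_listSlice, hsliceL]
          rw [ht, List.drop_length]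
        have hnomatch : ∀ q ∈ rest, PySem.Chars.startswith t q = false := by
          intro q hq
          by_contra hc
          have hq2 : q.length = 2 := h2' q hq
          have hqt : t = q := prefix_eq_of_length (by simpa using hc) (by omega)
          have hqp : q = p := hqt.symm.trans ht
          exact hpn (hqp ▸ hq)
        have hfind : rest.find? (fun p => PySem.Chars.startswith t p && decide (t.length > p.length)) = none := by
          rw [List.find?_eq_none]
          intro q hq
          simp [hnomatch q hq]
        rw [hcond, hrem, sorted_sufs]
        have hsl : pvSufLoopA [] pvSufsSorted = none := by decide
        rw [hsl]
        simp only [if_neg (not_not_intro rfl)]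
        rw [prefLoop_nomatch t rest hnomatch, hfind]
        rfl
    · rw [if_neg hs]
      have hcond : (PySem.Chars.startswith t p && decide (t.length > p.length)) = false := by
        simp [hs]
      rw [hcond]
      exact ih h2' hnd'

-- ===== VERDICT (by name: the statement is the Claim_ definition above) =====
theorem extract_morphemes_spec : Claim_equal_extract_morphemes := by
  intro token _
  show extract_morphemes token = extract_morphemes_alt token
  unfold extract_morphemes extract_morphemes_alt
  dsimp only []
  rw [sorted_prefs, prefLoop_eq_find token.toList pvPrefs (by decide) (by decide)]
  cases hf : pvPrefs.find?
      (fun p => PySem.Chars.startswith token.toList p && decide (token.toList.length > p.length)) with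
  | some p =>
    simp only [Option.map_some]
    rw [sorted_sufs, loop1_eq_find _ pvSufsSorted (by decide), find_eq_best _ 1]
    by_cases hb : pvBestSuffix (List.drop p.length token.toList) 1 = [] <;> simp [hb]
  | none =>
    simp only [Option.map_none]
    rw [sorted_sufs, loop2_eq_find token.toList pvSufsSorted (by decide), find_eq_best _ 2]
    by_cases hb : pvBestSuffix token.toList 2 = [] <;> simp [hb]
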